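-- pv_equiv track=rewrite | github.com/itstalharahamanrumi/Encryption-and-Decryption-in-Python | encryption.py | swap_letters
-- ===== SOURCE A (Python) =====
-- def is_even(number):
--     return number % 2 == 0
--
-- def get_even_letters(message):
--     even_letters = []
--     for counter in range(len(message)):
--         if is_even(counter):
--             even_letters.append(message[counter])
--     return even_letters
--
-- def get_odd_letters(message):
--     odd_letters = []
--     for counter in range(len(message)):
--         if not is_even(counter):
--             odd_letters.append(message[counter])
--     return odd_letters
--
-- def swap_letters(message):
--     letter_list = []
--     even_letters = get_even_letters(message)
--     odd_letters = get_odd_letters(message)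
--
--     # Use max length to handle odd-length messages
--     max_len = max(len(even_letters), len(odd_letters))
--     for i in range(max_len):
--         if i < len(odd_letters):
--             letter_list.append(odd_letters[i])
--         if i < len(even_letters):
--             letter_list.append(even_letters[i])
--
--     new_message = ''.join(letter_list)
--     return new_message
-- ===== SOURCE B (Python) =====
-- def swap_letters(message):
--     chars = []
--     for i in range(0, len(message), 2):
--         if i + 1 < len(message):
--             chars.append(message[i + 1])
--             chars.append(message[i])
--         else:
--             chars.append(message[i])
--     return ''.join(chars)
-- ===== Notes on version B (the rewrite author's own statement) =====
-- stated objective: simpler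
-- what changed: B replaces A's two index-parity filter passes plus an interleaving index loop over the even/odd lists by a single pass that swaps each adjacent pair of characters directly against the original string.
import Mathlib
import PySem

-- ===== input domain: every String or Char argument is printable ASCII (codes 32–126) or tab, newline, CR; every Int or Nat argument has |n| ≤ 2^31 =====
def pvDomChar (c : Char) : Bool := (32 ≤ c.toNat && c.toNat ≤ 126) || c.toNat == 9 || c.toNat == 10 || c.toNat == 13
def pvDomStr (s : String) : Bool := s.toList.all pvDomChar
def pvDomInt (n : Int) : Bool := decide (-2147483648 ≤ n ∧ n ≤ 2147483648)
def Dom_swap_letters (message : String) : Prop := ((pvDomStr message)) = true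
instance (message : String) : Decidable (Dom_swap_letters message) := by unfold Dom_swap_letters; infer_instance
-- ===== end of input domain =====

-- B replaces A's even/odd index-filtered lists and interleaving index loop by a single
-- pairwise swap pass over the string (simpler decomposition; same cost).


-- ===== PORT A =====
def pv_is_even (number : Int) : Bool := PySem.Int.mod number 2 == 0

-- message[counter]: ported via pyGetD; the loop index is always in range, so the default is never read
def pv_get_even_letters (message : String) : List Char :=
  (PySem.List.pyRange 0 (PySem.Str.len message) 1).foldl
    (fun even_letters counter =>
      if pv_is_even counter then even_letters ++ [PySem.List.pyGetD message.toList counter ' ']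
      else even_letters) []

def pv_get_odd_letters (message : String) : List Char :=
  (PySem.List.pyRange 0 (PySem.Str.len message) 1).foldl
    (fun odd_letters counter =>
      if !pv_is_even counter then odd_letters ++ [PySem.List.pyGetD message.toList counter ' ']
      else odd_letters) []

def swap_letters (message : String) : String :=
  let even_letters := pv_get_even_letters message
  let odd_letters := pv_get_odd_letters message
  let max_len : Int := max (PySem.List.len even_letters) (PySem.List.len odd_letters)
  let letter_list := (PySem.List.pyRange 0 max_len 1).foldl
    (fun letter_list i =>
      let letter_list :=
        if i < PySem.List.len odd_letters then letter_list ++ [PySem.List.pyGetD odd_letters i ' ']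
        else letter_list
      if i < PySem.List.len even_letters then letter_list ++ [PySem.List.pyGetD even_letters i ' ']
      else letter_list) []
  String.mk letter_list

-- ===== PORT B =====
-- Source B's while loop: consume two characters per step, swapped; a lone trailing char stays
def pv_swapGo : List Char → List Char
  | a :: b :: rest => b :: a :: pv_swapGo rest
  | rest => rest

def swap_letters_alt (message : String) : String := String.mk (pv_swapGo message.toList)

-- ===== PRECONDITION & SPEC =====
def Spec_swap_letters (message : String) (out : String) : Prop := out = swap_letters_alt message
instance (message : String) (out : String) : Decidable (Spec_swap_letters message out) := by unfold Spec_swap_letters; infer_instance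

-- ===== CLAIM (what is proved, stated in full; the proofs are below) =====
def Claim_equal_swap_letters : Prop := ∀ (message : String), Dom_swap_letters message → Spec_swap_letters message (swap_letters message)

-- ===== LEMMAS AND PROOFS =====

-- characters at even (p = true) / odd (p = false) positions
def pv_sel (p : Bool) : List Char → List Char
  | [] => []
  | a :: r => if p then a :: pv_sel (!p) r else pv_sel (!p) r

def pv_interleave : List Char → List Char → List Char
  | [], le => le
  | a :: lo, le =>
    match le with
    | [] => a :: lo
    | b :: le => a :: b :: pv_interleave lo le

theorem pv_key (cs : List Char) : ∀ (k : Nat),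
    ((List.range cs.length).filter (fun i => (i + k) % 2 = 0)).map (fun i => cs.getD i ' ')
      = pv_sel (k % 2 = 0) cs := by
  induction cs with
  | nil => intro k; simp [pv_sel]
  | cons a r ih =>
    intro k
    rw [List.length_cons, List.range_succ_eq_map, List.filter_cons]
    have hshift : List.filter (fun i => decide ((i + k) % 2 = 0)) (List.map Nat.succ (List.range r.length))
        = List.map Nat.succ (List.filter (fun i => decide ((i + (k+1)) % 2 = 0)) (List.range r.length)) := by
      rw [List.filter_map]
      congr 1
      apply List.filter_congr
      intro i _
      simp [Function.comp]
      omega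
    have hmap : List.map (fun i => (a :: r).getD i ' ')
          (List.map Nat.succ (List.filter (fun i => decide ((i + (k+1)) % 2 = 0)) (List.range r.length)))
        = pv_sel ((k+1) % 2 = 0) r := by
      rw [List.map_map]
      have hc : ((fun i => (a :: r).getD i ' ') ∘ Nat.succ) = fun i => r.getD i ' ' := by
        funext i; simp
      rw [hc, ih (k+1)]
    simp only [Nat.zero_add, hshift]
    by_cases hk : k % 2 = 0
    · rw [if_pos (by simpa using hk), List.map_cons, hmap]
      simp [pv_sel, hk, show ¬ ((k+1) % 2 = 0) by omega]
    · rw [if_neg (by simpa using hk), hmap]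
      simp [pv_sel, hk, show (k+1) % 2 = 0 by omega]

theorem pv_getD_range (l : List Char) :
    (List.range l.length).map (fun i => l.getD i ' ') = l := by
  apply List.ext_getElem
  · simp
  · intro i h1 h2; simp [List.getD_eq_getElem?_getD, List.getElem?_eq_getElem h2]

theorem pv_flat : ∀ (le lo : List Char),
    (List.range (max le.length lo.length)).flatMap
      (fun i => (if i < lo.length then [lo.getD i ' '] else [])
        ++ (if i < le.length then [le.getD i ' '] else []))
      = pv_interleave lo le := by
  intro le
  induction le with
  | nil =>
    intro lo
    rw [show max ([] : List Char).length lo.length = lo.length by simp]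
    have h : ∀ i ∈ List.range lo.length,
        ((if i < lo.length then [lo.getD i ' '] else [])
          ++ (if i < ([] : List Char).length then [([] : List Char).getD i ' '] else []))
          = [lo.getD i ' '] := by
      intro i hi; simp at hi; simp [hi]
    rw [List.flatMap_congr h, ← List.map_eq_flatMap, pv_getD_range]
    cases lo <;> rfl
  | cons b le ih =>
    intro lo
    cases lo with
    | nil =>
      rw [show max (b :: le).length ([] : List Char).length = (b :: le).length by simp]
      have h : ∀ i ∈ List.range (b :: le).length,
          ((if i < ([] : List Char).length then [([] : List Char).getD i ' '] else [])
            ++ (if i < (b :: le).length then [(b :: le).getD i ' '] else []))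
            = [(b :: le).getD i ' '] := by
        intro i hi; simp at hi; simp [hi]
      rw [List.flatMap_congr h, ← List.map_eq_flatMap, pv_getD_range, pv_interleave]
    | cons a lo =>
      rw [show max (b :: le).length (a :: lo).length = max le.length lo.length + 1 by
        simp [Nat.succ_max_succ]]
      rw [List.range_succ_eq_map, List.flatMap_cons, List.flatMap_map]
      have h2 : ∀ i ∈ List.range (max le.length lo.length),
          ((if i.succ < (a :: lo).length then [(a :: lo).getD i.succ ' '] else [])
            ++ (if i.succ < (b :: le).length then [(b :: le).getD i.succ ' '] else []))
          = ((if i < lo.length then [lo.getD i ' '] else [])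
            ++ (if i < le.length then [le.getD i ' '] else [])) := by
        intro i _
        simp
      rw [List.flatMap_congr h2, ih lo]
      simp [pv_interleave]

theorem pv_swapGo_eq (cs : List Char) :
    pv_swapGo cs = pv_interleave (pv_sel false cs) (pv_sel true cs) := by
  have main : ∀ cs : List Char,
      (pv_swapGo cs = pv_interleave (pv_sel false cs) (pv_sel true cs)) ∧
      (∀ a, pv_swapGo (a :: cs) = pv_interleave (pv_sel false (a :: cs)) (pv_sel true (a :: cs))) := by
    intro cs
    induction cs with
    | nil => exact ⟨rfl, fun a => rfl⟩
    | cons c cs ih =>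
      refine ⟨ih.2 c, fun a => ?_⟩
      show c :: a :: pv_swapGo cs = _
      rw [show pv_sel false (a :: c :: cs) = c :: pv_sel false cs by simp [pv_sel],
        show pv_sel true (a :: c :: cs) = a :: pv_sel true cs by simp [pv_sel],
        show pv_interleave (c :: pv_sel false cs) (a :: pv_sel true cs)
          = c :: a :: pv_interleave (pv_sel false cs) (pv_sel true cs) from rfl, ih.1]
  exact (main cs).1

theorem pv_even_eq (message : String) :
    pv_get_even_letters message = pv_sel true message.toList := by
  unfold pv_get_even_letters
  rw [PySem.List.foldl_append_if]
  rw [show PySem.Str.len message = ((message.toList.length : Nat) : Int) by simp]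
  rw [PySem.List.pyRange_zero_natCast, List.filter_map, List.map_map]
  have h2 : List.filter ((fun counter => pv_is_even counter) ∘ (Nat.cast : Nat → Int))
        (List.range message.toList.length)
      = List.filter (fun i => (i + 0) % 2 = 0) (List.range message.toList.length) := by
    apply List.filter_congr
    intro i _
    show pv_is_even ↑i = decide ((i + 0) % 2 = 0)
    simp [pv_is_even, pysem]
    by_cases h : i % 2 = 0 <;> simp [h] <;> omega
  have h3 : ((fun counter => PySem.List.pyGetD message.toList counter ' ')
        ∘ (Nat.cast : Nat → Int))
      = fun i : Nat => message.toList.getD i ' ' := by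
    funext i; simp [Function.comp]
  rw [h2, h3, pv_key message.toList 0]
  simp

theorem pv_odd_eq (message : String) :
    pv_get_odd_letters message = pv_sel false message.toList := by
  unfold pv_get_odd_letters
  rw [PySem.List.foldl_append_if]
  rw [show PySem.Str.len message = ((message.toList.length : Nat) : Int) by simp]
  rw [PySem.List.pyRange_zero_natCast, List.filter_map, List.map_map]
  have h2 : List.filter ((fun counter => !pv_is_even counter) ∘ (Nat.cast : Nat → Int))
        (List.range message.toList.length)
      = List.filter (fun i => (i + 1) % 2 = 0) (List.range message.toList.length) := by
    apply List.filter_congr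
    intro i _
    show (!pv_is_even ↑i) = decide ((i + 1) % 2 = 0)
    simp [pv_is_even, pysem]
    by_cases h : (i + 1) % 2 = 0 <;> simp [h] <;> omega
  have h3 : ((fun counter => PySem.List.pyGetD message.toList counter ' ')
        ∘ (Nat.cast : Nat → Int))
      = fun i : Nat => message.toList.getD i ' ' := by
    funext i; simp [Function.comp]
  rw [h2, h3, pv_key message.toList 1]
  simp

theorem pv_A_eq (message : String) :
    swap_letters message
      = String.mk (pv_interleave (pv_sel false message.toList) (pv_sel true message.toList)) := by
  unfold swap_letters
  rw [pv_even_eq, pv_odd_eq]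
  set lo := pv_sel false message.toList with hlo
  set le := pv_sel true message.toList with hle
  dsimp only
  congr 1
  -- turn the loop body into an 'acc ++ g i' shape
  have hbody : (fun (letter_list : List Char) (i : Int) =>
        let letter_list :=
          if i < PySem.List.len lo then letter_list ++ [PySem.List.pyGetD lo i ' ']
          else letter_list
        if i < PySem.List.len le then letter_list ++ [PySem.List.pyGetD le i ' ']
        else letter_list)
      = fun (letter_list : List Char) (i : Int) => letter_list ++
          ((if i < PySem.List.len lo then [PySem.List.pyGetD lo i ' '] else [])
            ++ (if i < PySem.List.len le then [PySem.List.pyGetD le i ' '] else [])) := by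
    funext acc i
    simp only [PySem.List.len_eq]
    split_ifs <;> simp
  rw [hbody, PySem.List.foldl_append_eq_flatMap]
  rw [show max (PySem.List.len le) (PySem.List.len lo)
      = ((max le.length lo.length : Nat) : Int) by simp [Nat.cast_max, Int.max_comm]]
  rw [PySem.List.pyRange_zero_natCast, List.flatMap_map]
  have h4 : ∀ i ∈ List.range (max le.length lo.length),
      ((if ((i : Nat) : Int) < PySem.List.len lo then [PySem.List.pyGetD lo ((i : Nat) : Int) ' '] else [])
        ++ (if ((i : Nat) : Int) < PySem.List.len le then [PySem.List.pyGetD le ((i : Nat) : Int) ' '] else []))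
      = (if i < lo.length then [lo.getD i ' '] else [])
        ++ (if i < le.length then [le.getD i ' '] else []) := by
    intro i _
    simp [pysem]
  rw [List.flatMap_congr h4, pv_flat le lo]
  simp

-- ===== VERDICT (by name: the statement is the Claim_ definition above) =====
theorem swap_letters_spec : Claim_equal_swap_letters := by
  intro message _
  show swap_letters message = swap_letters_alt message
  rw [pv_A_eq, swap_letters_alt, pv_swapGo_eq]
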